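-- pv_equiv track=rewrite | github.com/DonatFortini/review-cours | atelier code/atelier 3/exo3_atelier3.py | outpout_string
-- ===== SOURCE A (Python) =====
-- def outpout_string(mot:str,lpos:list)->str:
--     retour=''
--     if len(mot) != len(lpos):
--         for i in range(len(mot)):
--             if i in lpos:
--                 retour+=mot[i]
--             else:
--                 retour+='_'
--         return retour
--     return mot
-- ===== SOURCE B (Python) =====
-- def outpout_string(mot: str, lpos: list) -> str:
--     if len(mot) == len(lpos):
--         return mot
--     buf = ['_'] * len(mot)
--     for p in lpos:
--         if 0 <= p < len(mot):
--             buf[p] = mot[p]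
--     return ''.join(buf)
-- ===== Notes on version B (the rewrite author's own statement) =====
-- stated objective: alternative
-- what changed: Instead of scanning every index of mot and testing 'i in lpos' membership per character, B pre-fills a '_' buffer and scatters the kept characters into it by a single pass over lpos with a range guard, then joins.
import Mathlib
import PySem

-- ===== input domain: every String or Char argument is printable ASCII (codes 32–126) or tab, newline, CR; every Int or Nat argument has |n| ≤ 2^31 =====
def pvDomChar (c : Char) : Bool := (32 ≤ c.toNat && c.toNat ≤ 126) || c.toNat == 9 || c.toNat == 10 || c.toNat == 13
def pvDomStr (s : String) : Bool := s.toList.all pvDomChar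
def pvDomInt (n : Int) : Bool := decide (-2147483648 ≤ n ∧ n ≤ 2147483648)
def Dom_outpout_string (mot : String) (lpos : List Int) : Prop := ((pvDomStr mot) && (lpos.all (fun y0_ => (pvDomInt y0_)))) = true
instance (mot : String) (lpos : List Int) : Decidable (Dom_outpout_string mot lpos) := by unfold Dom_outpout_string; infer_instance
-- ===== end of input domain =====

-- B scatters the kept characters into a pre-filled '_' buffer by one pass over lpos,
-- replacing A's per-index 'i in lpos' membership scan.

-- ===== PORT A =====
-- mot[i] with 0 ≤ i < len(mot) is exact as cs.getD i.toNat '_' (the default is unreachable).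
def outpout_string (mot : String) (lpos : List Int) : String :=
  let cs := mot.toList
  if cs.length ≠ lpos.length then
    String.mk ((PySem.List.pyRange 0 (cs.length : Int) 1).foldl
      (fun retour i =>
        if lpos.contains i then retour ++ [cs.getD i.toNat '_'] else retour ++ ['_']) [])
  else mot

-- ===== PORT B =====
-- buf[p] = mot[p] with the explicit 0 ≤ p < len(mot) guard is exact as List.set.
def outpout_string_alt (mot : String) (lpos : List Int) : String :=
  let cs := mot.toList
  if cs.length = lpos.length then mot
  else
    String.mk (lpos.foldl
      (fun buf p => if 0 ≤ p ∧ p < (cs.length : Int) then buf.set p.toNat (cs.getD p.toNat '_') else buf)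
      (List.replicate cs.length '_'))

-- ===== PRECONDITION & SPEC =====
def Spec_outpout_string (mot : String) (lpos : List Int) (out : String) : Prop := out = outpout_string_alt mot lpos
instance (mot : String) (lpos : List Int) (out : String) : Decidable (Spec_outpout_string mot lpos out) := by unfold Spec_outpout_string; infer_instance

-- ===== CLAIM (what is proved, stated in full; the proofs are below) =====
def Claim_equal_outpout_string : Prop := ∀ (mot : String) (lpos : List Int), Dom_outpout_string mot lpos → Spec_outpout_string mot lpos (outpout_string mot lpos)

-- ===== LEMMAS AND PROOFS =====

-- A's loop appends one character per index: it is a map.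
theorem foldl_app_ite (c : Int → Bool) (x y : Int → Char) :
    ∀ (l : List Int) (acc : List Char),
      l.foldl (fun a i => if c i then a ++ [x i] else a ++ [y i]) acc
        = acc ++ l.map (fun i => if c i then x i else y i) := by
  intro l
  induction l with
  | nil => simp
  | cons p t ih =>
    intro acc
    by_cases h : c p <;> simp [h, ih, List.append_assoc]

-- B's scatter fold preserves the buffer length.
theorem scatter_length (cs : List Char) :
    ∀ (l : List Int) (buf : List Char),
      (l.foldl (fun b p => if 0 ≤ p ∧ p < (cs.length : Int) then b.set p.toNat (cs.getD p.toNat '_') else b) buf).length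
        = buf.length := by
  intro l
  induction l with
  | nil => simp
  | cons p t ih =>
    intro buf
    rw [List.foldl_cons]
    by_cases h : 0 ≤ p ∧ p < (cs.length : Int)
    · rw [if_pos h, ih, List.length_set]
    · rw [if_neg h, ih]

-- Per-index characterisation of B's scatter fold.
theorem scatter_getElem? (cs : List Char) :
    ∀ (l : List Int) (buf : List Char), buf.length = cs.length →
      ∀ (i : Nat), i < cs.length →
      (l.foldl (fun b p => if 0 ≤ p ∧ p < (cs.length : Int) then b.set p.toNat (cs.getD p.toNat '_') else b) buf)[i]?
        = if (i : Int) ∈ l then some (cs.getD i '_') else buf[i]? := by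
  intro l
  induction l with
  | nil => intro buf _ i _; simp
  | cons p t ih =>
    intro buf hlen i hi
    have hstep : ((if 0 ≤ p ∧ p < (cs.length : Int) then buf.set p.toNat (cs.getD p.toNat '_') else buf) : List Char).length = cs.length := by
      by_cases h : 0 ≤ p ∧ p < (cs.length : Int) <;> simp [h, hlen]
    rw [List.foldl_cons, ih _ hstep i hi]
    by_cases ht : (i : Int) ∈ t
    · simp [ht, List.mem_cons]
    · by_cases hp : p = (i : Int)
      · have h0 : 0 ≤ p ∧ p < (cs.length : Int) := by
          constructor <;> omega
        have hpt : p.toNat = i := by omega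
        simp [h0, hpt, ht, hp, List.getElem?_set_self, hlen, hi]
      · have hmem : ¬ ((i : Int) ∈ p :: t) := by
          intro hc
          rcases List.mem_cons.mp hc with hc | hc
          · exact hp hc.symm
          · exact ht hc
        by_cases h0 : 0 ≤ p ∧ p < (cs.length : Int)
        · have hne : p.toNat ≠ i := by omega
          simp [h0, hmem, ht, List.getElem?_set_ne hne]
        · simp [h0, hmem, ht]

-- The two masked character lists coincide.
theorem mask_lists_eq (cs : List Char) (lpos : List Int) :
    ((PySem.List.pyRange 0 (cs.length : Int) 1).foldl
      (fun retour i => if lpos.contains i then retour ++ [cs.getD i.toNat '_'] else retour ++ ['_']) [])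
    = lpos.foldl
        (fun buf p => if 0 ≤ p ∧ p < (cs.length : Int) then buf.set p.toNat (cs.getD p.toNat '_') else buf)
        (List.replicate cs.length '_') := by
  rw [foldl_app_ite (fun i => lpos.contains i) (fun i => cs.getD i.toNat '_') (fun _ => '_')]
  rw [PySem.List.pyRange_one]
  apply List.ext_getElem?
  intro i
  by_cases hi : i < cs.length
  · rw [scatter_getElem? cs lpos (List.replicate cs.length '_') (by simp) i hi]
    have h1 : ((List.range ((cs.length : Int) - 0).toNat).map (fun k => ((0 : Int) + k))).length = cs.length := by
      simp
    rw [List.getElem?_eq_getElem (by simpa [h1] using hi)]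
    simp [hi]
    by_cases hm : (i : Int) ∈ lpos <;> simp [hm]
  · rw [List.getElem?_eq_none, List.getElem?_eq_none]
    · rw [scatter_length]; simp; omega
    · simp; omega

-- ===== VERDICT (by name: the statement is the Claim_ definition above) =====
theorem outpout_string_spec : Claim_equal_outpout_string := by
  intro mot lpos _
  unfold Spec_outpout_string outpout_string outpout_string_alt
  by_cases h : mot.toList.length = lpos.length
  · simp [h]
  · simp only [ne_eq, h, not_false_eq_true, if_true, if_neg h]
    exact congrArg String.mk (mask_lists_eq mot.toList lpos)
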